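-- pv_equiv track=rewrite | github.com/hassan-31x/dsa-practise | practise/codeforces/oct23.py | powerTwo
-- ===== SOURCE A (Python) =====
-- def powerTwo(arr):
--     remove = 0
--     trackIndex = [0 for i in range(len(arr))]
--
--     for i in range(len(arr)):
--         found = False
--         if trackIndex[i] == 1:
--             continue
--         for j in range(0, len(arr)):
--             if i == j:
--                 continue
--             power = arr[i] + arr[j]
--             if (power & power-1 == 0): #check if power of 2
--                 found = True
--                 trackIndex[i] = 1
--                 trackIndex[j] = 1
--                 break
--         if found == False:
--             remove += 1
--
--     return remove
-- ===== SOURCE B (Python) =====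
-- def powerTwo(arr):
--     cnt = {}
--     for x in arr:
--         cnt[x] = cnt.get(x, 0) + 1
--     sums = [0] + [1 << k for k in range(34)]
--     remove = 0
--     for x in arr:
--         ok = False
--         for s in sums:
--             y = s - x
--             if cnt.get(y, 0) > (1 if y == x else 0):
--                 ok = True
--                 break
--         if not ok:
--             remove += 1
--     return remove
-- ===== Notes on version B (the rewrite author's own statement) =====
-- stated objective: faster
-- what changed: B replaces A's O(n^2) all-pairs scan with trackIndex marking by a hash-map of value counts built in one pass and, per element, a lookup of only the ~35 candidate power-of-two sums (0 and 2^k, k<34, which covers all sums of two 32-bit-bounded ints).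
import Mathlib
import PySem

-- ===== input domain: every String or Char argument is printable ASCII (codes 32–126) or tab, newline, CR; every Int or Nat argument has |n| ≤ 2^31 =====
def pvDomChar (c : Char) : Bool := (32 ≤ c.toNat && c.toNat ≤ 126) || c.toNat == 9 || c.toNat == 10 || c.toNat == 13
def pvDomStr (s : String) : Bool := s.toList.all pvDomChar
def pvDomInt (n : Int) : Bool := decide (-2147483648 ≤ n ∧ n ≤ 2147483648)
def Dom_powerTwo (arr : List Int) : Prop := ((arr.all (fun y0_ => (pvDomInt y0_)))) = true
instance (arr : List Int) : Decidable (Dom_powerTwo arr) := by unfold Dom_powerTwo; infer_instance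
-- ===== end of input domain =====

-- B replaces A's O(n^2) all-pairs scan with a value counter queried at the ~35 candidate
-- power-of-two sums per element (asymptotically faster; equal return value on the whole domain).

-- ===== PORT A =====
-- '(power & power-1 == 0)' — Python parses this as '(power & (power-1)) == 0'
def pow2chk (p : Int) : Bool := PySem.Int.band p (p - 1) == 0

-- inner 'for j in range(0, len(arr)): … break' — first j with i≠j and a power-of-two sum
def innerFind (arr : List Int) (i : Nat) : Option Nat :=
  (List.range arr.length).find? (fun j => !(i == j) && pow2chk (arr.getD i 0 + arr.getD j 0))

-- one outer-loop iteration on the state (remove, trackIndex)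
def stepA (arr : List Int) (st : Int × List Int) (i : Nat) : Int × List Int :=
  if st.2.getD i 0 = 1 then st
  else
    match innerFind arr i with
    | some j => (st.1, (st.2.set i 1).set j 1)
    | none => (st.1 + 1, st.2)

def powerTwo (arr : List Int) : Int :=
  ((List.range arr.length).foldl (stepA arr) (0, List.replicate arr.length 0)).1

-- ===== PORT B =====
-- sums = [0] + [1 << k for k in range(34)]
def sumsB : List Int := 0 :: (List.range 34).map (fun k => (1 : Int) <<< k)

-- inner 'for s in sums: … break' — does any candidate sum have a partner in the counter?
def hasPartner (cnt : PySem.Dict Int Int) (x : Int) : Bool :=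
  sumsB.any (fun s => PySem.Dict.getD cnt (s - x) 0 > (if s - x == x then 1 else 0))

def powerTwo_alt (arr : List Int) : Int :=
  let cnt := arr.foldl (fun d x => PySem.Dict.modify d x 0 (fun v => v + 1)) PySem.Dict.empty
  arr.foldl (fun r x => if hasPartner cnt x then r else r + 1) 0

-- ===== PRECONDITION & SPEC =====
def Spec_powerTwo (arr : List Int) (out : Int) : Prop := out = powerTwo_alt arr
instance (arr : List Int) (out : Int) : Decidable (Spec_powerTwo arr out) := by unfold Spec_powerTwo; infer_instance

-- ===== CLAIM (what is proved, stated in full; the proofs are below) =====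
def Claim_equal_powerTwo : Prop := ∀ (arr : List Int), Dom_powerTwo arr → Spec_powerTwo arr (powerTwo arr)

-- ===== LEMMAS AND PROOFS =====

theorem nat_land_pred_eq_zero (m : Nat) (hm : 0 < m) :
    (m &&& (m - 1) = 0) ↔ ∃ k, m = 2 ^ k := by
  induction m using Nat.strong_induction_on with
  | _ m ih =>
    rcases Nat.even_or_odd m with ⟨b, hb⟩ | ⟨b, hb⟩
    · have hb1 : 0 < b := by omega
      have h1 : m = Nat.bit false b := by simp [Nat.bit]; omega
      have h2 : m - 1 = Nat.bit true (b - 1) := by simp [Nat.bit]; omega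
      rw [h2, h1, Nat.land_bit]
      simp only [Bool.and_true, Nat.bit, cond_false]
      constructor
      · intro h
        have hz : b &&& (b - 1) = 0 := by omega
        obtain ⟨k, hk⟩ := (ih b (by omega) hb1).mp hz
        exact ⟨k + 1, by rw [pow_succ]; omega⟩
      · rintro ⟨k, hk⟩
        rcases k with _ | k
        · omega
        · have hbk : b = 2 ^ k := by rw [pow_succ] at hk; omega
          have := (ih b (by omega) hb1).mpr ⟨k, hbk⟩
          omega
    · rcases Nat.eq_zero_or_pos b with h0 | h0
      · subst h0
        constructor
        · intro _; exact ⟨0, by omega⟩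
        · intro _; simp [hb]
      · have h1 : m = Nat.bit true b := by simp [Nat.bit]; omega
        have h2 : m - 1 = Nat.bit false b := by simp [Nat.bit]; omega
        rw [h2, h1, Nat.land_bit]
        simp only [Bool.and_false, Nat.bit, cond_false, cond_true, Nat.and_self]
        constructor
        · intro h; omega
        · rintro ⟨k, hk⟩
          rcases k with _ | k
          · omega
          · rw [pow_succ] at hk; omega

theorem one_shl (k : Nat) : (1 : Int) <<< (k : Int) = 2 ^ k := by
  rw [Int.shiftLeft_natCast_right, Int.shiftLeft_eq]; ring

theorem mem_sumsB_iff (s : Int) : s ∈ sumsB ↔ s = 0 ∨ ∃ k : Nat, k < 34 ∧ s = 2 ^ k := by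
  simp [sumsB, one_shl, eq_comm]

theorem pow2chk_iff_mem_sumsB (s : Int) (h1 : -(4294967297 : Int) ≤ s) (h2 : s ≤ 4294967296) :
    pow2chk s = true ↔ s ∈ sumsB := by
  rw [mem_sumsB_iff]
  unfold pow2chk
  rw [beq_iff_eq]
  rcases lt_trichotomy s 0 with hneg | rfl | hpos
  · unfold PySem.Int.band
    rw [if_neg (by omega), if_neg (by omega)]
    constructor
    · intro h; omega
    · rintro (h | ⟨k, hk, h⟩)
      · omega
      · have : (0:Int) < 2 ^ k := by positivity
        omega
  · simp
  · obtain ⟨m, rfl⟩ : ∃ m : Nat, s = (m : Int) := ⟨s.toNat, by omega⟩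
    have hs1 : (m : Int) - 1 = ((m - 1 : Nat) : Int) := by omega
    rw [hs1, PySem.Int.band_natCast, Int.natCast_eq_zero,
      nat_land_pred_eq_zero m (by omega)]
    constructor
    · rintro ⟨k, hk⟩
      refine Or.inr ⟨k, ?_, ?_⟩
      · by_contra hk34
        have : 2 ^ 34 ≤ 2 ^ k := Nat.pow_le_pow_right (by norm_num) (by omega)
        omega
      · rw [hk]; push_cast; ring
    · rintro (h | ⟨k, hk, h⟩)
      · omega
      · refine ⟨k, ?_⟩
        have : ((2:Int) ^ k) = ((2 ^ k : Nat) : Int) := by push_cast; ring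
        omega

theorem mem_sumsB_pow2chk (s : Int) (hs : s ∈ sumsB) : pow2chk s = true := by
  rw [mem_sumsB_iff] at hs
  unfold pow2chk
  rw [beq_iff_eq]
  rcases hs with rfl | ⟨k, _, rfl⟩
  · decide
  · have h1 : ((2:Int) ^ k) = ((2 ^ k : Nat) : Int) := by push_cast; ring
    have h2 : ((2:Int) ^ k) - 1 = ((2 ^ k - 1 : Nat) : Int) := by
      have : 1 ≤ 2 ^ k := Nat.one_le_two_pow
      omega
    rw [h2, h1, PySem.Int.band_natCast, Int.natCast_eq_zero,
      nat_land_pred_eq_zero (2 ^ k) (Nat.two_pow_pos k)]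
    exact ⟨k, rfl⟩

theorem getD_counter_fold (arr : List Int) (v : Int) :
    PySem.Dict.getD
      (arr.foldl (fun d x => PySem.Dict.modify d x 0 (fun w => w + 1)) PySem.Dict.empty) v 0 =
      (arr.count v : Int) := by
  rw [PySem.Dict.getD_foldl_modify_add_one]
  simp

theorem partner_count_iff (arr : List Int) (i : Nat) (hi : i < arr.length) (y : Int) :
    (∃ j, j < arr.length ∧ j ≠ i ∧ arr.getD j 0 = y) ↔
      (if y = arr.getD i 0 then 1 else 0) < (arr.count y : Int) := by
  rw [List.getD_eq_getElem arr 0 hi]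
  by_cases hxy : y = arr[i]
  · rw [if_pos hxy]
    constructor
    · rintro ⟨j, hj, hji, hjy⟩
      rw [List.getD_eq_getElem arr 0 hj] at hjy
      have hdup : List.Duplicate y arr := by
        rw [List.duplicate_iff_exists_distinct_get]
        rcases Nat.lt_or_ge j i with h | h
        · exact ⟨⟨j, hj⟩, ⟨i, hi⟩, h, hjy.symm, hxy⟩
        · exact ⟨⟨i, hi⟩, ⟨j, hj⟩, Fin.mk_lt_mk.mpr (by omega), hxy, hjy.symm⟩
      have := List.duplicate_iff_two_le_count.mp hdup
      omega
    · intro h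
      have h2 : 2 ≤ arr.count y := by omega
      obtain ⟨n, m, hnm, hn, hm⟩ :=
        List.duplicate_iff_exists_distinct_get.mp (List.duplicate_iff_two_le_count.mpr h2)
      by_cases hni : (n : Nat) = i
      · exact ⟨m, m.isLt, by omega, by rw [List.getD_eq_getElem arr 0 m.isLt]; exact hm.symm⟩
      · exact ⟨n, n.isLt, hni, by rw [List.getD_eq_getElem arr 0 n.isLt]; exact hn.symm⟩
  · rw [if_neg hxy]
    constructor
    · rintro ⟨j, hj, hji, hjy⟩
      rw [List.getD_eq_getElem arr 0 hj] at hjy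
      have : y ∈ arr := hjy ▸ List.getElem_mem hj
      have := List.count_pos_iff.mpr this
      omega
    · intro h
      have : y ∈ arr := List.count_pos_iff.mp (by omega)
      obtain ⟨j, hj, hjy⟩ := List.mem_iff_getElem.mp this
      refine ⟨j, hj, ?_, by rw [List.getD_eq_getElem arr 0 hj]; exact hjy⟩
      intro hji
      subst hji
      exact hxy hjy.symm

theorem point_eq (arr : List Int) (hdom : Dom_powerTwo arr) (i : Nat) (hi : i < arr.length) :
    (List.range arr.length).any
        (fun j => !(i == j) && pow2chk (arr.getD i 0 + arr.getD j 0)) =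
      hasPartner (arr.foldl (fun d x => PySem.Dict.modify d x 0 (fun v => v + 1)) PySem.Dict.empty)
        (arr.getD i 0) := by
  unfold hasPartner
  have hbd : ∀ z ∈ arr, -2147483648 ≤ z ∧ z ≤ 2147483648 := by
    intro z hz
    have := (List.all_eq_true.mp hdom) z hz
    simpa [pvDomInt] using this
  have hx : arr.getD i 0 ∈ arr := by
    rw [List.getD_eq_getElem arr 0 hi]; exact List.getElem_mem hi
  rw [Bool.eq_iff_iff, List.any_eq_true, List.any_eq_true]
  constructor
  · rintro ⟨j, hjr, hj⟩
    rw [List.mem_range] at hjr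
    simp only [Bool.and_eq_true, Bool.not_eq_eq_eq_not, Bool.not_true, beq_eq_false_iff_ne] at hj
    obtain ⟨hij, hp2⟩ := hj
    have hy : arr.getD j 0 ∈ arr := by
      rw [List.getD_eq_getElem arr 0 hjr]; exact List.getElem_mem hjr
    refine ⟨arr.getD i 0 + arr.getD j 0, ?_, ?_⟩
    · rw [← pow2chk_iff_mem_sumsB _ (by have := hbd _ hx; have := hbd _ hy; omega)
        (by have := hbd _ hx; have := hbd _ hy; omega)]
      exact hp2
    · rw [decide_eq_true_iff]
      have hsx : arr.getD i 0 + arr.getD j 0 - arr.getD i 0 = arr.getD j 0 := by ring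
      rw [hsx, getD_counter_fold]
      have := (partner_count_iff arr i hi (arr.getD j 0)).mp ⟨j, hjr, fun h => hij h.symm, rfl⟩
      rcases eq_or_ne (arr.getD j 0) (arr.getD i 0) with he | he
      · rw [if_pos he] at this
        rw [if_pos (by rw [beq_iff_eq]; exact he)]
        omega
      · rw [if_neg he] at this
        rw [if_neg (by rw [beq_iff_eq]; exact he)]
        omega
  · rintro ⟨s, hs, hcond⟩
    rw [decide_eq_true_iff, getD_counter_fold] at hcond
    have hcnt : (if s - arr.getD i 0 = arr.getD i 0 then (1:Int) else 0) < (arr.count (s - arr.getD i 0) : Int) := by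
      rcases eq_or_ne (s - arr.getD i 0) (arr.getD i 0) with he | he
      · rw [if_pos he]; rw [if_pos (by rw [beq_iff_eq]; exact he)] at hcond; omega
      · rw [if_neg he]; rw [if_neg (by rw [beq_iff_eq]; exact he)] at hcond; omega
    obtain ⟨j, hj, hji, hjy⟩ := (partner_count_iff arr i hi (s - arr.getD i 0)).mpr hcnt
    refine ⟨j, List.mem_range.mpr hj, ?_⟩
    simp only [Bool.and_eq_true, Bool.not_eq_eq_eq_not, Bool.not_true, beq_eq_false_iff_ne]
    refine ⟨fun h => hji h.symm, ?_⟩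
    have : arr.getD i 0 + arr.getD j 0 = s := by rw [hjy]; ring
    rw [this]
    exact mem_sumsB_pow2chk s hs

theorem foldA_eq (arr : List Int) (l : List Nat) (hl : ∀ i ∈ l, i < arr.length)
    (rem : Int) (track : List Int) (hlen : track.length = arr.length)
    (hinv : ∀ k, k < arr.length → track.getD k 0 = 1 →
      (List.range arr.length).any
        (fun j => !(k == j) && pow2chk (arr.getD k 0 + arr.getD j 0)) = true) :
    (l.foldl (stepA arr) (rem, track)).1 =
      rem + (l.countP (fun i => !(List.range arr.length).any
        (fun j => !(i == j) && pow2chk (arr.getD i 0 + arr.getD j 0))) : Int) := by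
  induction l generalizing rem track with
  | nil => simp
  | cons i l ih =>
    have hi : i < arr.length := hl i (List.mem_cons_self ..)
    have hl' : ∀ j ∈ l, j < arr.length := fun j hj => hl j (List.mem_cons_of_mem _ hj)
    simp only [List.foldl_cons, List.countP_cons]
    by_cases h1 : track.getD i 0 = 1
    · have hPb := hinv i hi h1
      rw [show stepA arr (rem, track) i = (rem, track) from by
        simp only [stepA]; rw [if_pos h1]]
      rw [ih hl' rem track hlen hinv, hPb]
      simp only [Bool.not_true, if_neg (by simp : ¬ (false = true))]
      push_cast; ring
    · cases hfind : innerFind arr i with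
      | none =>
        have hPb : (List.range arr.length).any
            (fun j => !(i == j) && pow2chk (arr.getD i 0 + arr.getD j 0)) = false := by
          rw [List.any_eq_false]
          intro x hx
          have := List.find?_eq_none.mp hfind x hx
          simpa using this
        rw [show stepA arr (rem, track) i = (rem + 1, track) from by
          simp only [stepA]; rw [if_neg h1, hfind]]
        rw [ih hl' (rem + 1) track hlen hinv, hPb]
        simp only [Bool.not_false, if_pos]
        push_cast; ring
      | some j =>
        have hq := List.find?_some hfind
        have hjr := List.mem_of_find?_eq_some hfind
        rw [List.mem_range] at hjr
        simp only [Bool.and_eq_true, Bool.not_eq_eq_eq_not, Bool.not_true,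
          beq_eq_false_iff_ne] at hq
        obtain ⟨hij, hp2⟩ := hq
        have hPbi : (List.range arr.length).any
            (fun j => !(i == j) && pow2chk (arr.getD i 0 + arr.getD j 0)) = true := by
          rw [List.any_eq_true]
          refine ⟨j, List.mem_range.mpr hjr, ?_⟩
          simp only [Bool.and_eq_true, Bool.not_eq_eq_eq_not, Bool.not_true,
            beq_eq_false_iff_ne]
          exact ⟨hij, hp2⟩
        have hPbj : (List.range arr.length).any
            (fun j' => !(j == j') && pow2chk (arr.getD j 0 + arr.getD j' 0)) = true := by
          rw [List.any_eq_true]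
          refine ⟨i, List.mem_range.mpr hi, ?_⟩
          simp only [Bool.and_eq_true, Bool.not_eq_eq_eq_not, Bool.not_true,
            beq_eq_false_iff_ne]
          refine ⟨fun h => hij h.symm, ?_⟩
          rw [show arr.getD j 0 + arr.getD i 0 = arr.getD i 0 + arr.getD j 0 from by ring]
          exact hp2
        rw [show stepA arr (rem, track) i = (rem, (track.set i 1).set j 1) from by
          simp only [stepA]; rw [if_neg h1, hfind]]
        rw [ih hl' rem ((track.set i 1).set j 1) (by simp [hlen]) ?_, hPbi]
        · simp only [Bool.not_true, if_neg (by simp : ¬ (false = true))]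
          push_cast; ring
        · intro k hk hk1
          have hkt : k < ((track.set i 1).set j 1).length := by
            simp only [List.length_set]; omega
          rw [List.getD_eq_getElem _ 0 hkt, List.getElem_set, List.getElem_set] at hk1
          rcases eq_or_ne j k with rfl | hjk
          · exact hPbj
          · rw [if_neg hjk] at hk1
            rcases eq_or_ne i k with rfl | hik
            · exact hPbi
            · rw [if_neg hik] at hk1
              refine hinv k hk ?_
              rw [List.getD_eq_getElem _ 0 (by omega)]
              exact hk1

theorem map_getD_range (arr : List Int) :
    (List.range arr.length).map (fun i => arr.getD i 0) = arr := by
  apply List.ext_getElem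
  · simp
  · intro k h1 h2
    simp only [List.getElem_map, List.getElem_range]
    exact List.getD_eq_getElem arr 0 h2

-- ===== VERDICT (by name: the statement is the Claim_ definition above) =====
theorem powerTwo_spec : Claim_equal_powerTwo := by
  intro arr hdom
  unfold Spec_powerTwo
  have hA : powerTwo arr = 0 + ((List.range arr.length).countP
      (fun i => !(List.range arr.length).any
        (fun j => !(i == j) && pow2chk (arr.getD i 0 + arr.getD j 0))) : Int) := by
    unfold powerTwo
    refine foldA_eq arr (List.range arr.length) (fun i hi => List.mem_range.mp hi) 0
      (List.replicate arr.length 0) (List.length_replicate) ?_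
    intro k hk h1
    exfalso
    rw [List.getD_eq_getElem _ 0 (by simpa using hk), List.getElem_replicate] at h1
    exact absurd h1 (by norm_num)
  have hB : powerTwo_alt arr = 0 + (arr.countP
      (fun x => !hasPartner (arr.foldl
        (fun d x => PySem.Dict.modify d x 0 (fun v => v + 1)) PySem.Dict.empty) x) : Int) := by
    unfold powerTwo_alt
    rw [PySem.List.foldl_congr_mem arr _
      (fun r x => if (!hasPartner (arr.foldl
        (fun d x => PySem.Dict.modify d x 0 (fun v => v + 1)) PySem.Dict.empty) x) = true
        then r + 1 else r) 0
      (by intro acc x _; by_cases h : hasPartner (arr.foldl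
            (fun d x => PySem.Dict.modify d x 0 (fun v => v + 1)) PySem.Dict.empty) x <;>
          simp [h])]
    rw [PySem.List.foldl_if_add_one]
  rw [hA, hB]
  congr 1
  rw [show (arr.countP (fun x => !hasPartner (arr.foldl
      (fun d x => PySem.Dict.modify d x 0 (fun v => v + 1)) PySem.Dict.empty) x)) =
      ((List.range arr.length).map (fun i => arr.getD i 0)).countP
        (fun x => !hasPartner (arr.foldl
          (fun d x => PySem.Dict.modify d x 0 (fun v => v + 1)) PySem.Dict.empty) x) from by
    rw [map_getD_range]]
  rw [List.countP_map]
  congr 1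
  apply List.countP_congr
  intro k hk
  rw [List.mem_range] at hk
  simp only [Function.comp]
  rw [point_eq arr hdom k hk]
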